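-- pv_equiv track=rewrite | github.com/ashish230897/translation-errors-crosslingual-learning | third_party/attention_analysis.py | get_diff_tokens
-- ===== SOURCE A (Python) =====
-- def search(token, j, cs_premise_tokens):
--     found = False
--     index = -1
--     for k in range(j, len(cs_premise_tokens)):
--         if cs_premise_tokens[k] == token:
--             found = True
--             index = k
--             break
--     return found, index
--
-- def get_diff_tokens(first_tokens, second_tokens):
--     i = 0
--     j = 0
--     diff_tokens = []
--     diff_indices = []
--
--     while i < len(first_tokens) and j < len(second_tokens):
--         if first_tokens[i] == second_tokens[j]:
--             i += 1
--             j += 1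
--         else:
--             found, index = search(first_tokens[i], j, second_tokens)
--             if found:
--                 j = index
--                 i += 1
--             else:
--                 diff_tokens.append(first_tokens[i])
--                 diff_indices.append(i)
--                 i += 1
--     return diff_tokens, diff_indices
-- ===== SOURCE B (Python) =====
-- from bisect import bisect_left
--
-- def get_diff_tokens(first_tokens, second_tokens):
--     # index every token of second_tokens by its sorted list of positions
--     positions = {}
--     for idx, tok in enumerate(second_tokens):
--         positions.setdefault(tok, []).append(idx)
--     m = len(second_tokens)
--     diff_tokens = []
--     diff_indices = []
--     j = 0
--     for i, tok in enumerate(first_tokens):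
--         if j >= m:
--             break
--         if tok == second_tokens[j]:
--             j += 1
--         else:
--             lst = positions.get(tok, [])
--             k = bisect_left(lst, j)
--             if k < len(lst):
--                 j = lst[k]
--             else:
--                 diff_tokens.append(tok)
--                 diff_indices.append(i)
--     return diff_tokens, diff_indices
-- ===== Notes on version B (the rewrite author's own statement) =====
-- stated objective: faster
-- what changed: B replaces A's per-mismatch linear rescan of second_tokens (the inner search loop) by a positions dictionary built once over second_tokens plus a bisect lookup for the first occurrence >= j.
import Mathlib
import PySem

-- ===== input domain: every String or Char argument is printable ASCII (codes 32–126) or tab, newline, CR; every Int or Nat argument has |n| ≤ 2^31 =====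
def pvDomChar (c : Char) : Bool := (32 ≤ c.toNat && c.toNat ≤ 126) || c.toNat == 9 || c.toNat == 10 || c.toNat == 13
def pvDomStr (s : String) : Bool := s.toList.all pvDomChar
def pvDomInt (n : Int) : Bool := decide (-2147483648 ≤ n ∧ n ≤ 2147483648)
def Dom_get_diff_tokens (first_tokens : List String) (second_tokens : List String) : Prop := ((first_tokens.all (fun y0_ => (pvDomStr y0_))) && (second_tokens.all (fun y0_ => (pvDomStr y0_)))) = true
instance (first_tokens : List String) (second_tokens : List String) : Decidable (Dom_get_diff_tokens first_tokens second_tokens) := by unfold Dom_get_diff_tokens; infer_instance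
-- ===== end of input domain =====

-- B replaces A's per-mismatch linear scan of second_tokens by a positions index built once
-- plus a bisect lookup (objective: faster); return values are proved identical.

-- ===== PORT A =====
-- search: loop 'for k in range(j, len(cs))' with break; (found, index) result.
def searchGo (token : String) (cs : List String) : List Int → Bool × Int
  | [] => (false, -1)
  | k :: rest =>
    if PySem.List.pyGetD cs k "" = token then (true, k) else searchGo token cs rest

def search (token : String) (j : Int) (cs : List String) : Bool × Int :=
  searchGo token cs (PySem.List.pyRange j (cs.length : Int) 1)

-- the while loop of A, state (i, j, diff_tokens, diff_indices)
def gdtLoop (first second : List String) (i j : Nat) (dt : List String) (di : List Int) :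
    List String × List Int :=
  if h : i < first.length ∧ j < second.length then
    if first[i]'h.1 = second[j]'h.2 then
      gdtLoop first second (i+1) (j+1) dt di
    else
      let r := search (first[i]'h.1) (j : Int) second
      if r.1 then
        gdtLoop first second (i+1) r.2.toNat dt di
      else
        gdtLoop first second (i+1) j (dt ++ [first[i]'h.1]) (di ++ [(i : Int)])
  else (dt, di)
termination_by first.length - i
decreasing_by all_goals omega

def get_diff_tokens (first_tokens : List String) (second_tokens : List String) :
    List String × List Int :=
  gdtLoop first_tokens second_tokens 0 0 [] []

-- ===== PORT B =====
-- positions.setdefault(tok, []).append(idx) over enumerate(second_tokens)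
def buildPositions (second : List String) : PySem.Dict String (List Int) :=
  (PySem.List.enumerate second).foldl
    (fun d p => d.modify p.2 [] (fun l => l ++ [p.1])) PySem.Dict.empty

-- the for-loop of B over enumerate(first_tokens), with the 'if j >= m: break'
def gdtAltLoop (second : List String) (pos : PySem.Dict String (List Int)) :
    List (Int × String) → Nat → List String → List Int → List String × List Int
  | [], _, dt, di => (dt, di)
  | (i, tok) :: rest, j, dt, di =>
    if second.length ≤ j then (dt, di)
    else if tok = second.getD j "" then
      gdtAltLoop second pos rest (j+1) dt di
    else
      let lst := pos.getD tok []
      let k := PySem.List.bisectLeft lst (j : Int)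
      if k < lst.length then
        gdtAltLoop second pos rest (lst.getD k 0).toNat dt di
      else
        gdtAltLoop second pos rest j (dt ++ [tok]) (di ++ [i])

def get_diff_tokens_alt (first_tokens : List String) (second_tokens : List String) :
    List String × List Int :=
  gdtAltLoop second_tokens (buildPositions second_tokens)
    (PySem.List.enumerate first_tokens) 0 [] []

-- ===== PRECONDITION & SPEC =====
def Spec_get_diff_tokens (first_tokens : List String) (second_tokens : List String) (out : List String × List Int) : Prop := out = get_diff_tokens_alt first_tokens second_tokens
instance (first_tokens : List String) (second_tokens : List String) (out : List String × List Int) : Decidable (Spec_get_diff_tokens first_tokens second_tokens out) := by unfold Spec_get_diff_tokens; infer_instance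

-- ===== CLAIM (what is proved, stated in full; the proofs are below) =====
def Claim_equal_get_diff_tokens : Prop := ∀ (first_tokens : List String) (second_tokens : List String), Dom_get_diff_tokens first_tokens second_tokens → Spec_get_diff_tokens first_tokens second_tokens (get_diff_tokens first_tokens second_tokens)

-- ===== LEMMAS AND PROOFS =====

-- occurrence indices of tok in l, counting from s (strictly increasing)
def occsR (tok : String) (s : Int) : List String → List Int
  | [] => []
  | t :: r => if t = tok then s :: occsR tok (s+1) r else occsR tok (s+1) r

lemma mem_occsR (tok : String) (l : List String) (s v : Int) :
    v ∈ occsR tok s l ↔ ∃ k : Nat, ∃ h : k < l.length, v = s + k ∧ l[k] = tok := by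
  induction l generalizing s with
  | nil => simp [occsR]
  | cons t r ih =>
    simp only [occsR]
    constructor
    · intro hv
      by_cases ht : t = tok
      · simp only [if_pos ht, List.mem_cons] at hv
        rcases hv with rfl | hv
        · exact ⟨0, by simp, by simpa using ht⟩
        · rcases (ih (s+1)).1 hv with ⟨k, hk, rfl, hget⟩
          exact ⟨k+1, by simpa using hk, by omega, by simpa using hget⟩
      · simp only [if_neg ht] at hv
        rcases (ih (s+1)).1 hv with ⟨k, hk, rfl, hget⟩
        exact ⟨k+1, by simpa using hk, by omega, by simpa using hget⟩
    · rintro ⟨k, hk, rfl, hget⟩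
      cases k with
      | zero =>
        simp only [List.getElem_cons_zero] at hget
        simp [if_pos hget]
      | succ k =>
        simp only [List.getElem_cons_succ] at hget
        have hmem : s + ((k : Int) + 1) ∈ occsR tok (s+1) r := by
          apply (ih (s+1)).2
          exact ⟨k, by simpa using hk, by omega, hget⟩
        by_cases ht : t = tok
        · simp only [if_pos ht, List.mem_cons]
          right
          exact_mod_cast hmem
        · simp only [if_neg ht]
          exact_mod_cast hmem

lemma occsR_pairwise (tok : String) (l : List String) (s : Int) :
    (occsR tok s l).Pairwise (· < ·) := by
  induction l generalizing s with
  | nil => simp [occsR]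
  | cons t r ih =>
    have hge : ∀ v ∈ occsR tok (s+1) r, s < v := by
      intro v hv
      rcases (mem_occsR tok r (s+1) v).1 hv with ⟨k, hk, rfl, _⟩
      omega
    simp only [occsR]
    split_ifs with ht
    · exact List.Pairwise.cons hge (ih (s+1))
    · exact ih (s+1)

-- head of a strictly increasing list is its minimum
lemma head?_of_min (l : List Int) (x : Int) (hpw : l.Pairwise (· < ·)) (hx : x ∈ l)
    (hmin : ∀ v ∈ l, x ≤ v) : l.head? = some x := by
  cases l with
  | nil => simp at hx
  | cons h t =>
    rcases List.mem_cons.1 hx with rfl | hmem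
    · rfl
    · exfalso
      have h1 := (List.pairwise_cons.1 hpw).1 _ hmem
      have h2 := hmin h List.mem_cons_self
      omega

-- ---- A's search equals head-of-filter on the occurrence list ----
lemma searchGo_pyRange (tok : String) (second : List String) (j : Nat) :
    searchGo tok second (PySem.List.pyRange (j : Int) (second.length : Int) 1) =
      match ((occsR tok 0 second).filter (fun v => decide ((j : Int) ≤ v))).head? with
      | some v => (true, v)
      | none => (false, -1) := by
  by_cases hj : second.length ≤ j
  · rw [PySem.List.pyRange_one_eq_nil (by exact_mod_cast hj)]
    have hnil : ((occsR tok 0 second).filter (fun v => decide ((j : Int) ≤ v))) = [] := by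
      apply List.filter_eq_nil_iff.2
      intro v hv
      rcases (mem_occsR tok second 0 v).1 hv with ⟨k, hk, rfl, _⟩
      simp only [decide_eq_true_eq]
      omega
    simp [hnil, searchGo]
  · push_neg at hj
    rw [PySem.List.pyRange_one_cons (by exact_mod_cast hj)]
    simp only [searchGo, PySem.List.pyGetD_natCast, List.getD_eq_getElem second "" hj]
    by_cases heq : second[j] = tok
    · simp only [if_pos heq]
      have hjmem : (j : Int) ∈ (occsR tok 0 second).filter (fun v => decide ((j : Int) ≤ v)) :=
        List.mem_filter.2 ⟨(mem_occsR tok second 0 (j : Int)).2 ⟨j, hj, by simp, heq⟩, by simp⟩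
      have hpw : ((occsR tok 0 second).filter (fun v => decide ((j : Int) ≤ v))).Pairwise (· < ·) :=
        (occsR_pairwise tok second 0).filter _
      have hmin : ∀ v ∈ (occsR tok 0 second).filter (fun v => decide ((j : Int) ≤ v)), (j : Int) ≤ v := by
        intro v hv
        simpa using (List.mem_filter.1 hv).2
      rw [head?_of_min _ _ hpw hjmem hmin]
    · simp only [if_neg heq]
      have hstep : searchGo tok second (PySem.List.pyRange ((j : Int) + 1) (second.length : Int) 1) =
          match ((occsR tok 0 second).filter (fun v => decide (((j+1 : Nat) : Int) ≤ v))).head? with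
          | some v => (true, v)
          | none => (false, -1) := by
        have h := searchGo_pyRange tok second (j+1)
        rwa [show (((j+1 : Nat)) : Int) = (j : Int) + 1 by push_cast; ring] at h
      rw [hstep]
      have hcongr : (occsR tok 0 second).filter (fun v => decide (((j+1 : Nat) : Int) ≤ v)) =
          (occsR tok 0 second).filter (fun v => decide ((j : Int) ≤ v)) := by
        apply List.filter_congr
        intro v hv
        rcases (mem_occsR tok second 0 v).1 hv with ⟨k, hk, rfl, hget⟩
        have hkj : k ≠ j := by rintro rfl; exact heq hget
        simp only [decide_eq_decide]
        push_cast
        omega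
      rw [hcongr]
termination_by second.length - j
decreasing_by omega

-- ---- bisect on a strictly increasing list equals head-of-filter ----
lemma bisect_filter_head (lst : List Int) (hpw : lst.Pairwise (· < ·)) (x : Int) :
    (lst.filter (fun v => decide (x ≤ v))).head? = lst[PySem.List.bisectLeft lst x]? := by
  have hle : lst.Pairwise (· ≤ ·) := hpw.imp le_of_lt
  obtain ⟨hk, hbefore, hafter⟩ := PySem.List.bisectLeft_spec lst x hle
  set k := PySem.List.bisectLeft lst x with hkdef
  have hft : (lst.take k).filter (fun v => decide (x ≤ v)) = [] := by
    apply List.filter_eq_nil_iff.2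
    intro v hv
    obtain ⟨i, hi, rfl⟩ := List.mem_iff_getElem.1 hv
    have hil : i < lst.length := by rw [List.length_take] at hi; omega
    have hik : i < k := by rw [List.length_take] at hi; omega
    rw [List.getElem_take]
    simpa using hbefore i hil hik
  have hfd : (lst.drop k).filter (fun v => decide (x ≤ v)) = lst.drop k := by
    apply List.filter_eq_self.2
    intro v hv
    obtain ⟨i, hi, rfl⟩ := List.mem_iff_getElem.1 hv
    have hil : k + i < lst.length := by rw [List.length_drop] at hi; omega
    rw [List.getElem_drop]
    simpa using hafter (k + i) hil (by omega)
  conv_lhs => rw [← List.take_append_drop k lst]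
  rw [List.filter_append, hft, hfd, List.nil_append, List.head?_drop]

-- ---- the positions dict holds exactly the occurrence lists ----
lemma occsR_eq_enumerate (tok : String) (l : List String) (s : Int) :
    ((PySem.List.enumerate l s).filter (fun p => p.2 == tok)).map (fun p => p.1) =
      occsR tok s l := by
  induction l generalizing s with
  | nil => simp [PySem.List.enumerate_nil, occsR]
  | cons t r ih =>
    rw [PySem.List.enumerate_cons]
    by_cases ht : t = tok
    · simp [occsR, ht, ih (s+1)]
    · simp [occsR, ht, ih (s+1)]

lemma build_positions_getD (second : List String) (tok : String) :
    (buildPositions second).getD tok [] = occsR tok 0 second := by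
  unfold buildPositions
  have hmap : (PySem.List.enumerate second).foldl
      (fun d p => d.modify p.2 [] (fun l => l ++ [p.1])) PySem.Dict.empty =
      ((PySem.List.enumerate second).map (fun p => (p.2, p.1))).foldl
        (fun d q => d.modify q.1 [] (fun l => l ++ [q.2])) PySem.Dict.empty := by
    rw [List.foldl_map]
  rw [hmap, PySem.Dict.getD_foldl_modify_append]
  rw [List.filter_map]
  rw [List.map_map]
  have hpred : ((fun p : String × Int => p.1 == tok) ∘ (fun p : Int × String => (p.2, p.1))) =
      (fun p : Int × String => p.2 == tok) := rfl
  rw [hpred]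
  have hcomp : ((fun x : String × Int => x.2) ∘ (fun p : Int × String => (p.2, p.1))) =
      (fun p : Int × String => p.1) := rfl
  rw [hcomp, occsR_eq_enumerate]
  rfl

-- drop of the enumeration, cons form
lemma enumerate_drop_cons (first : List String) (i : Nat) (hi : i < first.length) :
    (PySem.List.enumerate first).drop i =
      ((i : Int), first[i]) :: (PySem.List.enumerate first).drop (i+1) := by
  have hlen : i < (PySem.List.enumerate first 0).length := by
    rw [PySem.List.length_enumerate]; exact hi
  rw [← List.getElem_cons_drop hlen, PySem.List.getElem_enumerate]
  simp

-- one unfolding step of each loop in the mismatch case (zeta-reduced shapes)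
lemma gdtLoop_step_else (first second : List String) (i j : Nat) (dt : List String)
    (di : List Int) (h : i < first.length ∧ j < second.length)
    (hne : ¬ first[i]'h.1 = second[j]'h.2) :
    gdtLoop first second i j dt di =
      if (search (first[i]'h.1) (j : Int) second).1 then
        gdtLoop first second (i+1) (search (first[i]'h.1) (j : Int) second).2.toNat dt di
      else
        gdtLoop first second (i+1) j (dt ++ [first[i]'h.1]) (di ++ [(i : Int)]) := by
  rw [gdtLoop, dif_pos h, if_neg hne]

lemma gdtAltLoop_cons_else (second : List String) (pos : PySem.Dict String (List Int))
    (rest : List (Int × String)) (i : Int) (tok : String) (j : Nat) (dt : List String)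
    (di : List Int) (hj : ¬ second.length ≤ j) (hne : ¬ tok = second.getD j "") :
    gdtAltLoop second pos ((i, tok) :: rest) j dt di =
      if PySem.List.bisectLeft (pos.getD tok []) (j : Int) < (pos.getD tok []).length then
        gdtAltLoop second pos rest
          ((pos.getD tok []).getD (PySem.List.bisectLeft (pos.getD tok []) (j : Int)) 0).toNat dt di
      else
        gdtAltLoop second pos rest j (dt ++ [tok]) (di ++ [i]) := by
  rw [gdtAltLoop, if_neg hj, if_neg hne]

-- ---- the two loops agree ----
lemma loop_eq (first second : List String) (i j : Nat) (dt : List String) (di : List Int) :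
    gdtLoop first second i j dt di =
      gdtAltLoop second (buildPositions second) ((PySem.List.enumerate first).drop i) j dt di := by
  by_cases hi : i < first.length
  · rw [enumerate_drop_cons first i hi]
    by_cases hj : j < second.length
    · by_cases heq : first[i] = second[j]
      · rw [gdtAltLoop, if_neg (not_le.mpr hj),
          if_pos (show first[i] = second.getD j "" by
            rw [List.getD_eq_getElem second "" hj]; exact heq)]
        rw [gdtLoop, dif_pos ⟨hi, hj⟩, if_pos heq]
        exact loop_eq first second (i+1) (j+1) dt di
      · rw [gdtAltLoop_cons_else second _ _ _ _ _ _ _ (not_le.mpr hj)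
          (show ¬ first[i] = second.getD j "" by
            rw [List.getD_eq_getElem second "" hj]; exact heq)]
        rw [gdtLoop_step_else first second i j dt di ⟨hi, hj⟩ heq]
        have hlst : (buildPositions second).getD (first[i]) [] = occsR (first[i]) 0 second :=
          build_positions_getD second (first[i])
        rw [hlst]
        have hbis := bisect_filter_head (occsR (first[i]) 0 second)
          (occsR_pairwise (first[i]) second 0) (j : Int)
        have hsearch : search (first[i]) (j : Int) second =
            match ((occsR (first[i]) 0 second).filter (fun v => decide ((j : Int) ≤ v))).head? with
            | some v => (true, v)
            | none => (false, -1) := searchGo_pyRange (first[i]) second j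
        set lst := occsR (first[i]) 0 second with hlstdef
        set k := PySem.List.bisectLeft lst (j : Int) with hkdef
        by_cases hkl : k < lst.length
        · rw [List.getElem?_eq_getElem hkl] at hbis
          rw [hbis] at hsearch
          rw [if_pos hkl, List.getD_eq_getElem lst 0 hkl, hsearch]
          exact loop_eq first second (i+1) (lst[k]).toNat dt di
        · rw [List.getElem?_eq_none (by omega)] at hbis
          rw [hbis] at hsearch
          rw [if_neg hkl, hsearch]
          exact loop_eq first second (i+1) j (dt ++ [first[i]]) (di ++ [(i : Int)])
    · rw [gdtLoop, dif_neg (by omega), gdtAltLoop, if_pos (by omega)]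
  · have hdrop : (PySem.List.enumerate first).drop i = [] := by
      apply List.drop_eq_nil_of_le
      rw [PySem.List.length_enumerate]; omega
    rw [hdrop, gdtLoop, dif_neg (by omega), gdtAltLoop]
termination_by first.length - i
decreasing_by all_goals omega

-- ===== VERDICT (by name: the statement is the Claim_ definition above) =====
theorem get_diff_tokens_spec : Claim_equal_get_diff_tokens := by
  intro first second _
  unfold Spec_get_diff_tokens get_diff_tokens get_diff_tokens_alt
  simpa using loop_eq first second 0 0 [] []
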